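-- pv_equiv track=rewrite | github.com/alexbaryzhikov/codebase-archive | Python/other/queensDomination.py | MarkCoverage
-- ===== SOURCE A (Python) =====
-- def MarkCoverage( queens ):
--     '''
--     queens: queens positions as a tuple
--
--     returns: board as a list, controlled squares marked with 1
--              returns [ 0 ] in case of invalid queen position
--     '''
--     # check if any of the queens is on the black diagonal
--     blackDiagonal = ( 7, 14, 21, 28, 35, 42, 49, 56 )
--     if set( queens ) & set( blackDiagonal ): return [ 0 ]
--
--     # mark squares controlled by queens
--     board = [ 0 for i in range( 64 ) ]
--     for i in blackDiagonal: board[ i ] = 1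
--     for q in queens:
--         row, col = q // 8, q % 8
--         offsetNE = row + col    # NE-diagonal offset
--         offsetNW = col - row    # NW-diagonal offset
--
--         if offsetNE < 7:                            # upper half
--             numRowElems =       7 - row
--             numColElems =       7 - col
--             numNEDiagElems =    1 + offsetNE
--             firstRowElem =      8 * row
--             firstColElem =      col
--             firstNEDiagElem =   offsetNE
--         else:                                       # lower half
--             numRowElems =       row
--             numColElems =       col
--             numNEDiagElems =    15 - offsetNE
--             firstRowElem =      7 * row + 8
--             firstColElem =      64 - 7 * col
--             firstNEDiagElem =   8 * offsetNE - 49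
--
--         for i in range( numRowElems ):              # mark row
--             board[ firstRowElem + i ] = 1
--         for i in range( numColElems ):              # mark column
--             board[ firstColElem + 8 * i ] = 1
--         for i in range( numNEDiagElems ):           # mark NE-diagonal
--             board[ firstNEDiagElem + 7 * i ] = 1
--
--         # setup and mark NW-diagonal
--         numNWDiagElems = 8 - abs( offsetNW )
--         if offsetNW > 0:                            # right offset
--             firstNWDiagElem = offsetNW
--         else:                                       # left offset
--             firstNWDiagElem = 8 * ( - offsetNW )
--         if offsetNE % 2:                            # black squares have boundary
--             numNWDiagElems //= 2                    # cut off half of the elements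
--             if offsetNE > 7:                        # if lower half
--                 firstNWDiagElem += 9 * ( numNWDiagElems + 1 )   # then offset first element
--
--         for i in range( numNWDiagElems ):           # mark NW-diagonal
--             board[ firstNWDiagElem + 9 * i ] = 1
--
--     return board
-- ===== SOURCE B (Python) =====
-- # Uniform blocked-ray traversal instead of A's per-case closed-form offset arithmetic.
-- _WALL = (7, 14, 21, 28, 35, 42, 49, 56)
--
-- def MarkCoverage(queens):
--     if any(q in _WALL for q in queens):
--         return [0]
--     board = [0] * 64
--     for w in _WALL:
--         board[w] = 1
--     for q in queens:
--         r, c = divmod(q, 8)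
--         board[q] = 1
--         for dr in (-1, 0, 1):
--             for dc in (-1, 0, 1):
--                 if dr == 0 and dc == 0:
--                     continue
--                 nr, nc = r + dr, c + dc
--                 while 0 <= nr <= 7 and 0 <= nc <= 7 and nr + nc != 7:
--                     board[8 * nr + nc] = 1
--                     nr += dr
--                     nc += dc
--     return board
-- ===== Notes on version B (the rewrite author's own statement) =====
-- stated objective: simpler
-- what changed: Replaces A's per-queen closed-form segment arithmetic (upper/lower-half first-element and count formulas plus the parity-based NW-diagonal halving) with a uniform walk of the queen's eight rays that marks cells step by step until the board edge or the pre-marked black-diagonal wall.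
import Mathlib
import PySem

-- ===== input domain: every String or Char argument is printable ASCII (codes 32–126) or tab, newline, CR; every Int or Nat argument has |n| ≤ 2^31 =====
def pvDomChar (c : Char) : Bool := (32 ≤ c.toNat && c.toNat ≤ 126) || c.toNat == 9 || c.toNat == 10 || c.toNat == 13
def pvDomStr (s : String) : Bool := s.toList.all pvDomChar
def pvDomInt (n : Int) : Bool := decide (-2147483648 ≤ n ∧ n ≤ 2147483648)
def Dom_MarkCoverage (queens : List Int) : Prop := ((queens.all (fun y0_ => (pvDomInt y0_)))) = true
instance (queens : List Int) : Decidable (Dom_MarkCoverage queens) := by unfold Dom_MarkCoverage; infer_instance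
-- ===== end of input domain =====

-- B marks the controlled squares by walking each queen's eight rays until the board edge or the
-- black-diagonal wall, instead of A's closed-form per-segment offset arithmetic; same results.

-- ===== PORT A =====
-- blackDiagonal = ( 7, 14, 21, 28, 35, 42, 49, 56 )
def pvBD : List Int := [7, 14, 21, 28, 35, 42, 49, 56]

-- the body of A's 'for q in queens' loop (board[i] = 1 is pySetD; indices are in range under Pre_)
def pvMarkA (b : List Int) (q : Int) : List Int :=
  let row := PySem.Int.floordiv q 8
  let col := PySem.Int.mod q 8
  let offsetNE := row + col
  let offsetNW := col - row
  -- A assigns the six quantities in one if/else block; each 'let' repeats that condition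
  let numRowElems    := if offsetNE < 7 then 7 - row else row
  let numColElems    := if offsetNE < 7 then 7 - col else col
  let numNEDiagElems := if offsetNE < 7 then 1 + offsetNE else 15 - offsetNE
  let firstRowElem   := if offsetNE < 7 then 8 * row else 7 * row + 8
  let firstColElem   := if offsetNE < 7 then col else 64 - 7 * col
  let firstNEDiagElem := if offsetNE < 7 then offsetNE else 8 * offsetNE - 49
  let b := (PySem.List.pyRange 0 numRowElems 1).foldl
             (fun b i => PySem.List.pySetD b (firstRowElem + i) 1) b
  let b := (PySem.List.pyRange 0 numColElems 1).foldl
             (fun b i => PySem.List.pySetD b (firstColElem + 8 * i) 1) b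
  let b := (PySem.List.pyRange 0 numNEDiagElems 1).foldl
             (fun b i => PySem.List.pySetD b (firstNEDiagElem + 7 * i) 1) b
  -- setup and mark NW-diagonal ('if offsetNE % 2:' is Python truthiness: mod ≠ 0)
  let numNWDiagElems0 := 8 - |offsetNW|
  let firstNWDiagElem0 := if offsetNW > 0 then offsetNW else 8 * (-offsetNW)
  let numNWDiagElems := if PySem.Int.mod offsetNE 2 ≠ 0 then
      PySem.Int.floordiv numNWDiagElems0 2 else numNWDiagElems0
  let firstNWDiagElem := if PySem.Int.mod offsetNE 2 ≠ 0 ∧ offsetNE > 7 then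
      firstNWDiagElem0 + 9 * (numNWDiagElems + 1) else firstNWDiagElem0
  (PySem.List.pyRange 0 numNWDiagElems 1).foldl
    (fun b i => PySem.List.pySetD b (firstNWDiagElem + 9 * i) 1) b

def MarkCoverage (queens : List Int) : List Int :=
  -- if set( queens ) & set( blackDiagonal ): return [ 0 ]
  if PySem.Set.inter (PySem.Set.ofList queens) (PySem.Set.ofList pvBD) ≠ [] then [0]
  else
    let board := (PySem.List.pyRange 0 64 1).map (fun _ => (0 : Int))
    let board := pvBD.foldl (fun b i => PySem.List.pySetD b i 1) board
    queens.foldl pvMarkA board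

-- ===== PORT B =====
-- the eight ray directions (dr, dc)
def pvDirs : List (Int × Int) := [(-1,-1),(-1,0),(-1,1),(0,-1),(0,1),(1,-1),(1,0),(1,1)]

-- the 'while 0 <= nr <= 7 and 0 <= nc <= 7 and nr+nc != 7' loop; a ray takes at most 8 steps,
-- the fuel only makes the same computation total
def pvRay (b : List Int) (nr nc dr dc : Int) : Nat → List Int
  | 0 => b
  | fuel + 1 =>
    if 0 ≤ nr ∧ nr ≤ 7 ∧ 0 ≤ nc ∧ nc ≤ 7 ∧ nr + nc ≠ 7 then
      pvRay (PySem.List.pySetD b (8 * nr + nc) 1) (nr + dr) (nc + dc) dr dc fuel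
    else b

def pvMarkB (b : List Int) (q : Int) : List Int :=
  let r := PySem.Int.floordiv q 8
  let c := PySem.Int.mod q 8
  let b := PySem.List.pySetD b q 1
  pvDirs.foldl (fun b d => pvRay b (r + d.1) (c + d.2) d.1 d.2 8) b

def MarkCoverage_alt (queens : List Int) : List Int :=
  if queens.any (fun q => pvBD.contains q) then [0]
  else
    let board := List.replicate 64 (0 : Int)
    let board := pvBD.foldl (fun b i => PySem.List.pySetD b i 1) board
    queens.foldl pvMarkB board

-- ===== PRECONDITION & SPEC =====
-- Pre_ restricts the queens to the board's natural domain: positions ≥ 64 make A raise IndexError,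
-- and negative positions make A mark stray wrapped cells through Python negative indexing, an
-- artefact of A's implementation outside the natural domain (unless some queen is on the black
-- diagonal, where A returns [0] before any indexing).
def Pre_MarkCoverage (queens : List Int) : Prop :=
  (∃ q ∈ queens, q ∈ pvBD) ∨ (∀ q ∈ queens, 0 ≤ q ∧ q < 64)
instance (queens : List Int) : Decidable (Pre_MarkCoverage queens) := by
  unfold Pre_MarkCoverage; infer_instance

def pvWitness_MarkCoverage : List Int := [0, 27, 63]

def Spec_MarkCoverage (queens : List Int) (out : List Int) : Prop := out = MarkCoverage_alt queens
instance (queens : List Int) (out : List Int) : Decidable (Spec_MarkCoverage queens out) := by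
  unfold Spec_MarkCoverage; infer_instance

-- ===== CLAIM (what is proved, stated in full; the proofs are below) =====
def Claim_equal_MarkCoverage : Prop := ∀ (queens : List Int), Dom_MarkCoverage queens →
  Pre_MarkCoverage queens → Spec_MarkCoverage queens (MarkCoverage queens)

-- ===== LEMMAS AND PROOFS =====

-- 'board[i] = 1' for every index of l in turn
def pvSetFold (b : List Int) (l : List Int) : List Int :=
  l.foldl (fun b i => PySem.List.pySetD b i 1) b

-- the list of indices A's per-queen loop assigns to
def pvIdxA (q : Int) : List Int :=
  let row := PySem.Int.floordiv q 8
  let col := PySem.Int.mod q 8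
  let offsetNE := row + col
  let offsetNW := col - row
  let numRowElems    := if offsetNE < 7 then 7 - row else row
  let numColElems    := if offsetNE < 7 then 7 - col else col
  let numNEDiagElems := if offsetNE < 7 then 1 + offsetNE else 15 - offsetNE
  let firstRowElem   := if offsetNE < 7 then 8 * row else 7 * row + 8
  let firstColElem   := if offsetNE < 7 then col else 64 - 7 * col
  let firstNEDiagElem := if offsetNE < 7 then offsetNE else 8 * offsetNE - 49
  let numNWDiagElems0 := 8 - |offsetNW|
  let firstNWDiagElem0 := if offsetNW > 0 then offsetNW else 8 * (-offsetNW)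
  let numNWDiagElems := if PySem.Int.mod offsetNE 2 ≠ 0 then
      PySem.Int.floordiv numNWDiagElems0 2 else numNWDiagElems0
  let firstNWDiagElem := if PySem.Int.mod offsetNE 2 ≠ 0 ∧ offsetNE > 7 then
      firstNWDiagElem0 + 9 * (numNWDiagElems + 1) else firstNWDiagElem0
  (PySem.List.pyRange 0 numRowElems 1).map (fun i => firstRowElem + i) ++
  (PySem.List.pyRange 0 numColElems 1).map (fun i => firstColElem + 8 * i) ++
  (PySem.List.pyRange 0 numNEDiagElems 1).map (fun i => firstNEDiagElem + 7 * i) ++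
  (PySem.List.pyRange 0 numNWDiagElems 1).map (fun i => firstNWDiagElem + 9 * i)

-- the list of indices one ray of B assigns to
def pvRayIdx (nr nc dr dc : Int) : Nat → List Int
  | 0 => []
  | fuel + 1 =>
    if 0 ≤ nr ∧ nr ≤ 7 ∧ 0 ≤ nc ∧ nc ≤ 7 ∧ nr + nc ≠ 7 then
      (8 * nr + nc) :: pvRayIdx (nr + dr) (nc + dc) dr dc fuel
    else []

-- the list of indices B's per-queen step assigns to
def pvIdxB (q : Int) : List Int :=
  let r := PySem.Int.floordiv q 8
  let c := PySem.Int.mod q 8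
  q :: pvDirs.flatMap (fun d => pvRayIdx (r + d.1) (c + d.2) d.1 d.2 8)

lemma pvMarkA_eq_setFold (b : List Int) (q : Int) :
    pvMarkA b q = pvSetFold b (pvIdxA q) := by
  simp [pvMarkA, pvIdxA, pvSetFold, List.foldl_append, List.foldl_map]

lemma pvRay_eq_setFold (fuel : Nat) : ∀ (b : List Int) (nr nc dr dc : Int),
    pvRay b nr nc dr dc fuel = pvSetFold b (pvRayIdx nr nc dr dc fuel) := by
  induction fuel with
  | zero => intro b nr nc dr dc; simp [pvRay, pvRayIdx, pvSetFold]
  | succ n ih =>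
    intro b nr nc dr dc
    simp only [pvRay, pvRayIdx]
    split
    · rw [ih]; simp [pvSetFold]
    · simp [pvSetFold]

lemma pvMarkB_eq_setFold (b : List Int) (q : Int) :
    pvMarkB b q = pvSetFold b (pvIdxB q) := by
  simp [pvMarkB, pvIdxB, pvDirs, pvRay_eq_setFold, pvSetFold, List.foldl_append]

lemma pvSetFold_length (l : List Int) : ∀ b : List Int, (pvSetFold b l).length = b.length := by
  induction l with
  | nil => intro b; simp [pvSetFold]
  | cons i l ih =>
    intro b
    simp only [pvSetFold, List.foldl_cons]
    rw [show (l.foldl (fun b i => PySem.List.pySetD b i 1) (PySem.List.pySetD b i 1)) =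
        pvSetFold (PySem.List.pySetD b i 1) l from rfl, ih]
    simp [PySem.List.length_pySetD]

lemma pvSetFold_getElem? (l : List Int) : ∀ (b : List Int)
    (_ : ∀ i ∈ l, 0 ≤ i ∧ i < (b.length : Int)) (p : Nat) (_ : p < b.length),
    (pvSetFold b l)[p]? = if (p : Int) ∈ l then some 1 else b[p]? := by
  induction l with
  | nil => intro b _ p hp; simp [pvSetFold]
  | cons i l ih =>
    intro b h p hp
    obtain ⟨hi0, hilen⟩ := h i (by simp)
    have hset : PySem.List.pySetD b i 1 = b.set i.toNat 1 :=
      PySem.List.pySetD_of_nonneg b 1 hi0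
    have hlen : (PySem.List.pySetD b i 1).length = b.length := by simp [hset]
    rw [show pvSetFold b (i :: l) = pvSetFold (PySem.List.pySetD b i 1) l from rfl]
    rw [ih (PySem.List.pySetD b i 1)
        (fun j hj => by rw [hlen]; exact h j (by simp [hj])) p (by omega)]
    have hset_get : (b.set i.toNat 1)[p]? = if i.toNat = p then some 1 else b[p]? := by
      rw [List.getElem?_set]
      have : i.toNat < b.length := by omega
      by_cases hip : i.toNat = p <;> simp [hip, hp]
    by_cases hmem : (p : Int) ∈ l
    · simp [hmem]
    · by_cases hpi : (p : Int) = i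
      · have hit : i.toNat = p := by omega
        rw [if_neg hmem, hset, hset_get, if_pos hit,
          if_pos (show (p : Int) ∈ i :: l by simp [hpi])]
      · have hne : ¬ i.toNat = p := by omega
        rw [if_neg hmem, hset, hset_get, if_neg hne,
          if_neg (show (p : Int) ∉ i :: l by simp [hpi, hmem])]

lemma pvSetFold_congr (b : List Int) (l1 l2 : List Int)
    (h1 : ∀ i ∈ l1, 0 ≤ i ∧ i < (b.length : Int))
    (h2 : ∀ i ∈ l2, 0 ≤ i ∧ i < (b.length : Int))
    (hm : ∀ i : Int, i ∈ l1 ↔ i ∈ l2) : pvSetFold b l1 = pvSetFold b l2 := by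
  apply List.ext_getElem?
  intro p
  by_cases hp : p < b.length
  · rw [pvSetFold_getElem? l1 b h1 p hp, pvSetFold_getElem? l2 b h2 p hp]
    exact if_congr (hm _) rfl rfl
  · have e1 : (pvSetFold b l1)[p]? = none := by
      rw [List.getElem?_eq_none_iff, pvSetFold_length]; omega
    have e2 : (pvSetFold b l2)[p]? = none := by
      rw [List.getElem?_eq_none_iff, pvSetFold_length]; omega
    rw [e1, e2]

-- the per-queen index sets coincide and lie inside the board (Bool form, so 'decide' checks all 64 squares)
def pvOKb (k : Nat) : Bool :=
  ((pvIdxA (k : Int)).all (fun i => decide (0 ≤ i ∧ i < 64))) &&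
  ((pvIdxB (k : Int)).all (fun i => decide (0 ≤ i ∧ i < 64))) &&
  ((List.range 64).all (fun p => decide ((p : Int) ∈ pvIdxA (k : Int)) ==
      decide ((p : Int) ∈ pvIdxB (k : Int))))

set_option maxHeartbeats 4000000 in
lemma pvOKb_all : ∀ k : Nat, k < 64 → (k : Int) ∉ pvBD → pvOKb k = true := by decide

lemma pvOKn_all (k : Nat) (hk : k < 64) (hbd : (k : Int) ∉ pvBD) :
    (∀ i ∈ pvIdxA (k : Int), 0 ≤ i ∧ i < 64) ∧
    (∀ i ∈ pvIdxB (k : Int), 0 ≤ i ∧ i < 64) ∧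
    (∀ p : Nat, p < 64 → ((p : Int) ∈ pvIdxA (k : Int) ↔ (p : Int) ∈ pvIdxB (k : Int))) := by
  have h := pvOKb_all k hk hbd
  simp only [pvOKb, Bool.and_eq_true, List.all_eq_true, decide_eq_true_eq,
    List.mem_range] at h
  obtain ⟨⟨ha, hb⟩, hab⟩ := h
  refine ⟨ha, hb, fun p hp => ?_⟩
  have h2 := hab p hp
  rw [beq_iff_eq] at h2
  exact decide_eq_decide.mp h2

lemma pvOK_int (q : Int) (h0 : 0 ≤ q) (h64 : q < 64) (hbd : q ∉ pvBD) :
    (∀ i ∈ pvIdxA q, 0 ≤ i ∧ i < 64) ∧ (∀ i ∈ pvIdxB q, 0 ≤ i ∧ i < 64) ∧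
    (∀ i : Int, i ∈ pvIdxA q ↔ i ∈ pvIdxB q) := by
  have hq : q = ((q.toNat : Nat) : Int) := by omega
  have hk : q.toNat < 64 := by omega
  obtain ⟨ha, hb, hab⟩ := pvOKn_all q.toNat hk (by rw [← hq]; exact hbd)
  rw [hq]
  refine ⟨ha, hb, fun i => ?_⟩
  constructor
  · intro hi
    obtain ⟨hi0, hi64⟩ := ha i hi
    have : i = ((i.toNat : Nat) : Int) := by omega
    rw [this] at hi ⊢
    exact (hab i.toNat (by omega)).mp hi
  · intro hi
    obtain ⟨hi0, hi64⟩ := hb i hi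
    have : i = ((i.toNat : Nat) : Int) := by omega
    rw [this] at hi ⊢
    exact (hab i.toNat (by omega)).mpr hi

lemma pvMark_eq (b : List Int) (hb : b.length = 64) (q : Int)
    (h0 : 0 ≤ q) (h64 : q < 64) (hbd : q ∉ pvBD) : pvMarkA b q = pvMarkB b q := by
  obtain ⟨ha, hb', hab⟩ := pvOK_int q h0 h64 hbd
  rw [pvMarkA_eq_setFold, pvMarkB_eq_setFold]
  exact pvSetFold_congr b _ _
    (fun i hi => by have := ha i hi; rw [hb]; push_cast; omega)
    (fun i hi => by have := hb' i hi; rw [hb]; push_cast; omega)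
    hab

lemma pvMark_length (b : List Int) (q : Int) : (pvMarkA b q).length = b.length := by
  rw [pvMarkA_eq_setFold, pvSetFold_length]

-- the two initial boards coincide
lemma pvInit_eq : (PySem.List.pyRange 0 64 1).map (fun _ => (0 : Int)) =
    List.replicate 64 (0 : Int) := by decide

-- the two black-diagonal tests coincide
lemma pvGuard_iff (queens : List Int) :
    (PySem.Set.inter (PySem.Set.ofList queens) (PySem.Set.ofList pvBD) ≠ []) ↔
    (queens.any (fun q => pvBD.contains q) = true) := by
  rw [ne_eq, List.eq_nil_iff_forall_not_mem]
  push Not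
  simp [PySem.Set.mem_inter, PySem.Set.mem_ofList, List.any_eq_true]

lemma pvFold_eq (qs : List Int) : ∀ b : List Int, b.length = 64 →
    (∀ q ∈ qs, (0 ≤ q ∧ q < 64) ∧ q ∉ pvBD) →
    qs.foldl pvMarkA b = qs.foldl pvMarkB b := by
  induction qs with
  | nil => intro b _ _; rfl
  | cons q qs ih =>
    intro b hb hq
    obtain ⟨⟨h0, h64⟩, hbd⟩ := hq q (by simp)
    simp only [List.foldl_cons]
    rw [← pvMark_eq b hb q h0 h64 hbd]
    exact ih (pvMarkA b q) (by rw [pvMark_length, hb])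
      (fun r hr => hq r (by simp [hr]))

theorem MarkCoverage_spec : Claim_equal_MarkCoverage := by
  intro queens _ hpre
  unfold Spec_MarkCoverage MarkCoverage MarkCoverage_alt
  by_cases hg : PySem.Set.inter (PySem.Set.ofList queens) (PySem.Set.ofList pvBD) ≠ []
  · rw [if_pos hg, if_pos ((pvGuard_iff queens).mp hg)]
  · have hg' : ¬ (queens.any (fun q => pvBD.contains q) = true) :=
      fun h => hg ((pvGuard_iff queens).mpr h)
    rw [if_neg hg, if_neg hg']
    simp only [pvInit_eq]
    have hnb : ∀ q ∈ queens, q ∉ pvBD := by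
      intro q hqm hqbd
      exact hg' (List.any_eq_true.mpr ⟨q, hqm, by simpa [List.contains_iff_mem] using hqbd⟩)
    have hrange : ∀ q ∈ queens, 0 ≤ q ∧ q < 64 := by
      rcases hpre with ⟨q, hqm, hqbd⟩ | h
      · exact absurd hqbd (hnb q hqm)
      · exact h
    have hblen : (pvBD.foldl (fun b i => PySem.List.pySetD b i 1)
        (List.replicate 64 (0 : Int))).length = 64 := by
      rw [show pvBD.foldl (fun b i => PySem.List.pySetD b i 1)
          (List.replicate 64 (0 : Int)) =
          pvSetFold (List.replicate 64 (0 : Int)) pvBD from rfl, pvSetFold_length]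
      simp
    exact pvFold_eq queens _ hblen (fun q hq => ⟨hrange q hq, hnb q hq⟩)
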